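-- pv_equiv track=rewrite | github.com/wadelab/opm-source-toolbox | src/opm_source_toolbox/core.py | _select_condition_indices
-- ===== SOURCE A (Python) =====
-- from typing import Iterable, Iterator, List, Optional, Sequence, Tuple
--
-- def _select_condition_indices(
--     n_conditions: int,
--     condition_codes: Optional[Sequence[int]],
-- ) -> List[int]:
--     if condition_codes is None:
--         return list(range(int(n_conditions)))
--     wanted = {int(cond) for cond in condition_codes}
--     return [idx for idx in range(int(n_conditions)) if ((idx % 5) + 1) in wanted]
-- ===== SOURCE B (Python) =====
-- from typing import List, Optional, Sequence
--
-- def _select_condition_indices(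
--     n_conditions: int,
--     condition_codes: Optional[Sequence[int]],
-- ) -> List[int]:
--     if condition_codes is None:
--         return list(range(int(n_conditions)))
--     n = int(n_conditions)
--     residues = {int(c) - 1 for c in condition_codes if 1 <= int(c) <= 5}
--     out = []
--     for r in residues:
--         out.extend(range(r, n, 5))
--     return sorted(out)
-- ===== Notes on version B (the rewrite author's own statement) =====
-- stated objective: faster
-- what changed: Replaces the scan-all-indices-and-test-mod comprehension by generating each wanted residue class directly as an arithmetic progression range(r, n, 5) and merging the progressions with a final sort, avoiding the per-index mod-and-set-lookup.
import Mathlib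
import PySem

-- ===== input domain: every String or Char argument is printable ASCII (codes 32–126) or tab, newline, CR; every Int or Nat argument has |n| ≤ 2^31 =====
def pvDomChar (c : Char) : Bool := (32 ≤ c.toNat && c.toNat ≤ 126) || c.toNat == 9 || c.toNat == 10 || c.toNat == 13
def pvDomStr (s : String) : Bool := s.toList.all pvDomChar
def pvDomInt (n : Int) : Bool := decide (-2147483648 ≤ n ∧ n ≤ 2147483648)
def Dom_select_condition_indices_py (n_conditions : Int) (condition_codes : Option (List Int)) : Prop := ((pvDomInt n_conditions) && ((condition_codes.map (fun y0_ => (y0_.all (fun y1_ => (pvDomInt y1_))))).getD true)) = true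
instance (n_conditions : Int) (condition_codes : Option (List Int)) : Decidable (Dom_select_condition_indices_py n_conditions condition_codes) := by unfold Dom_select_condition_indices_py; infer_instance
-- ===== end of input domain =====

-- B replaces A's scan of all indices with a mod test by generating each wanted
-- residue class as an arithmetic progression range(r, n, 5), merged and sorted
-- (alternative decomposition, same exact return value).

-- ===== PORT A =====
def select_condition_indices_py (n_conditions : Int) (condition_codes : Option (List Int)) : List Int :=
  match condition_codes with
  | none => PySem.List.pyRange 0 n_conditions 1
  | some codes =>
    let wanted : PySem.Set Int := PySem.Set.ofList codes
    (PySem.List.pyRange 0 n_conditions 1).filter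
      (fun idx => wanted.contains (PySem.Int.mod idx 5 + 1))

-- ===== PORT B =====
def select_condition_indices_py_alt (n_conditions : Int) (condition_codes : Option (List Int)) : List Int :=
  match condition_codes with
  | none => PySem.List.pyRange 0 n_conditions 1
  | some codes =>
    let residues : PySem.Set Int :=
      PySem.Set.ofList ((codes.filter (fun c => decide (1 ≤ c ∧ c ≤ 5))).map (fun c => c - 1))
    let out := residues.foldl (fun acc r => acc ++ PySem.List.pyRange r n_conditions 5) []
    PySem.List.sorted out (fun x => x)

-- ===== PRECONDITION & SPEC =====
def Spec_select_condition_indices_py (n_conditions : Int) (condition_codes : Option (List Int)) (out : List Int) : Prop := out = select_condition_indices_py_alt n_conditions condition_codes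
instance (n_conditions : Int) (condition_codes : Option (List Int)) (out : List Int) : Decidable (Spec_select_condition_indices_py n_conditions condition_codes out) := by unfold Spec_select_condition_indices_py; infer_instance

-- ===== CLAIM (what is proved, stated in full; the proofs are below) =====
def Claim_equal_select_condition_indices_py : Prop := ∀ (n_conditions : Int) (condition_codes : Option (List Int)), Dom_select_condition_indices_py n_conditions condition_codes → Spec_select_condition_indices_py n_conditions condition_codes (select_condition_indices_py n_conditions condition_codes)

-- ===== LEMMAS AND PROOFS =====

-- a % 5 in Python (PySem.Int.mod) is Lean's emod for the positive divisor 5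
theorem pv_mod5 (a : Int) : PySem.Int.mod a 5 = a % 5 := by
  simp [PySem.Int.mod, Int.fmod_eq_emod]

-- range(r, n, 5) is exactly the indices of range(0, n) whose residue mod 5 is r
theorem range5_eq_filter (n r : Int) (h0 : 0 ≤ r) (h5 : r < 5) :
    PySem.List.pyRange r n 5 =
      (PySem.List.pyRange 0 n 1).filter (fun x => decide (x % 5 = r)) := by
  have hp1 : List.Pairwise (· < ·) (PySem.List.pyRange r n 5) := by
    rw [PySem.List.pyRange_of_pos r n (by norm_num)]
    refine List.Pairwise.map _ ?_ List.pairwise_lt_range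
    intro a b hab
    omega
  have hp2 : List.Pairwise (· < ·)
      ((PySem.List.pyRange 0 n 1).filter (fun x => decide (x % 5 = r))) :=
    (PySem.List.pairwise_lt_pyRange_one 0 n).filter _
  have hmem : ∀ x, x ∈ PySem.List.pyRange r n 5 ↔
      x ∈ (PySem.List.pyRange 0 n 1).filter (fun x => decide (x % 5 = r)) := by
    intro x
    rw [PySem.List.mem_pyRange_iff_of_pos (by norm_num), List.mem_filter]
    rw [PySem.List.mem_pyRange_one]
    constructor
    · rintro ⟨h1, h2, h3⟩; refine ⟨⟨by omega, h2⟩, by simp; omega⟩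
    · rintro ⟨⟨h1, h2⟩, h3⟩; simp at h3; refine ⟨by omega, h2, by omega⟩
  have hperm : (PySem.List.pyRange r n 5).Perm
      ((PySem.List.pyRange 0 n 1).filter (fun x => decide (x % 5 = r))) :=
    (List.perm_ext_iff_of_nodup (hp1.imp ne_of_lt) (hp2.imp ne_of_lt)).mpr hmem
  exact hperm.eq_of_pairwise
    (fun a b _ _ hab hba => le_antisymm hab hba)
    (hp1.imp le_of_lt) (hp2.imp le_of_lt)

-- filters by disjoint predicates concatenate to the filter by the disjunction, up to permutation
theorem perm_filter_or {α : Type} (p q : α → Bool) (h : ∀ x, p x = true → q x = false)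
    (xs : List α) :
    (xs.filter p ++ xs.filter q).Perm (xs.filter (fun x => p x || q x)) := by
  induction xs with
  | nil => simp
  | cons a t ih =>
    by_cases hp : p a = true
    · simp [hp, h a hp]
      exact ih
    · by_cases hq : q a = true
      · simp [hp, hq]
        exact List.perm_middle.trans (ih.cons a)
      · simp [hp, hq]
        exact ih

-- merging the residue-class progressions permutes the mod-membership filter
theorem flatMap_ranges_perm (n : Int) (rs : List Int) (hnd : rs.Nodup)
    (hb : ∀ r ∈ rs, 0 ≤ r ∧ r < 5) :
    (rs.flatMap (fun r => PySem.List.pyRange r n 5)).Perm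
      ((PySem.List.pyRange 0 n 1).filter (fun x => decide (x % 5 ∈ rs))) := by
  induction rs with
  | nil => simp
  | cons r rs ih =>
    rcases List.nodup_cons.mp hnd with ⟨hr, hnd'⟩
    have hb' : ∀ s ∈ rs, 0 ≤ s ∧ s < 5 := fun s hs => hb s (List.mem_cons_of_mem _ hs)
    rcases hb r (List.mem_cons_self) with ⟨h0, h5⟩
    rw [List.flatMap_cons, range5_eq_filter n r h0 h5]
    have hperm := perm_filter_or (fun x => decide (x % 5 = r)) (fun x => decide (x % 5 ∈ rs))
      (by intro x hx; simp at hx ⊢; intro hmem; exact hr (hx ▸ hmem))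
      (PySem.List.pyRange 0 n 1)
    refine ((List.Perm.append_left _ (ih hnd' hb')).trans hperm).trans ?_
    have : ∀ x : Int, (decide (x % 5 = r) || decide (x % 5 ∈ rs)) = decide (x % 5 ∈ r :: rs) := by
      intro x; simp [List.mem_cons]
    simp only [this]
    exact List.Perm.rfl

-- the mod-membership test against the residue set equals A's wanted-set test
theorem pred_agree (codes : List Int) (x : Int) :
    decide (x % 5 ∈ PySem.Set.ofList
        ((codes.filter (fun c => decide (1 ≤ c ∧ c ≤ 5))).map (fun c => c - 1))) =
      (PySem.Set.ofList codes).contains (PySem.Int.mod x 5 + 1) := by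
  rw [pv_mod5]
  have hc : (PySem.Set.ofList codes).contains (x % 5 + 1) = true ↔ (x % 5 + 1) ∈ codes := by
    unfold PySem.Set.contains
    rw [List.contains_iff_mem, PySem.Set.mem_ofList]
  have hm : x % 5 ∈ PySem.Set.ofList
      ((codes.filter (fun c => decide (1 ≤ c ∧ c ≤ 5))).map (fun c => c - 1)) ↔
      (x % 5 + 1) ∈ codes := by
    rw [PySem.Set.mem_ofList, List.mem_map]
    constructor
    · rintro ⟨c, hc', he⟩
      rcases List.mem_filter.mp hc' with ⟨hcm, hcr⟩
      simp at hcr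
      have : c = x % 5 + 1 := by omega
      exact this ▸ hcm
    · intro hmem
      exact ⟨x % 5 + 1, List.mem_filter.mpr ⟨hmem, by simp; omega⟩, by ring⟩
  rw [Bool.eq_iff_iff, decide_eq_true_eq, hc, hm]

-- ===== VERDICT (by name: the statement is the Claim_ definition above) =====
theorem select_condition_indices_py_spec : Claim_equal_select_condition_indices_py := by
  intro n codes _
  unfold Spec_select_condition_indices_py select_condition_indices_py select_condition_indices_py_alt
  cases codes with
  | none => rfl
  | some cs =>
    simp only
    rw [PySem.List.foldl_append_eq_flatMap, List.nil_append]
    have hnd : (PySem.Set.ofList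
        ((cs.filter (fun c => decide (1 ≤ c ∧ c ≤ 5))).map (fun c => c - 1))).Nodup :=
      PySem.Set.nodup_ofList _
    have hb : ∀ r ∈ PySem.Set.ofList
        ((cs.filter (fun c => decide (1 ≤ c ∧ c ≤ 5))).map (fun c => c - 1)), 0 ≤ r ∧ r < 5 := by
      intro r hr
      rw [PySem.Set.mem_ofList, List.mem_map] at hr
      rcases hr with ⟨c, hc, he⟩
      rcases List.mem_filter.mp hc with ⟨_, hcr⟩
      simp at hcr
      omega
    have hperm := flatMap_ranges_perm n _ hnd hb
    have hfc : (PySem.List.pyRange 0 n 1).filter (fun x => decide (x % 5 ∈ PySem.Set.ofList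
          ((cs.filter (fun c => decide (1 ≤ c ∧ c ≤ 5))).map (fun c => c - 1)))) =
        (PySem.List.pyRange 0 n 1).filter
          (fun idx => (PySem.Set.ofList cs).contains (PySem.Int.mod idx 5 + 1)) :=
      List.filter_congr (fun x _ => pred_agree cs x)
    rw [hfc] at hperm
    have hp : List.Pairwise (fun a b : Int => a < b)
        ((PySem.List.pyRange 0 n 1).filter
          (fun idx => (PySem.Set.ofList cs).contains (PySem.Int.mod idx 5 + 1))) :=
      (PySem.List.pairwise_lt_pyRange_one 0 n).filter _
    exact (PySem.List.sorted_eq_of_perm_of_pairwise_lt _ _ (fun x => x) hperm.symm hp).symm
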